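-- pv_equiv track=rewrite | github.com/caueshimoda/auto_lista_adr | AUTO LISTA ADR.py | string_sem_lixo
-- ===== SOURCE A (Python) =====
-- def string_sem_lixo(string):
--     # Retorna a string do marker sem o MARKERS RULER do fim
--     controle = string.split()
--     retorno = ''
--     for palavra in controle:
--         if palavra.upper() == 'MARKERS':
--             return retorno
--         else:
--             retorno += f'{palavra} '
--     return retorno
-- ===== SOURCE B (Python) =====
-- def string_sem_lixo(string):
--     words = string.split()
--     upper = [w.upper() for w in words]
--     cut = upper.index('MARKERS') if 'MARKERS' in upper else len(words)
--     return ''.join(w + ' ' for w in words[:cut])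
-- ===== Notes on version B (the rewrite author's own statement) =====
-- stated objective: alternative
-- what changed: Replaces A's accumulate-until-hit loop (string concatenation with an early return) by a locate-then-slice-then-join decomposition: find the index of the first case-insensitive 'MARKERS' in the word list, slice the prefix, and join it in one pass.
import Mathlib
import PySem

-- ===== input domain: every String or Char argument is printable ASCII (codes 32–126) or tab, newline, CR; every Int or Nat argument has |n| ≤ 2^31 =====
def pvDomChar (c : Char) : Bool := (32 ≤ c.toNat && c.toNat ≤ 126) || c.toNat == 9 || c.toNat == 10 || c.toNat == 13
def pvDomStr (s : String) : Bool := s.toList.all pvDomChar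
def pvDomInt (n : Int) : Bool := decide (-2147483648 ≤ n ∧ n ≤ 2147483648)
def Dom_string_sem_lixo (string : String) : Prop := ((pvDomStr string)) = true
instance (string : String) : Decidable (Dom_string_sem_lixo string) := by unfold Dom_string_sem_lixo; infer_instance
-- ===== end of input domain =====

-- B replaces A's accumulate-until-hit loop by locate-the-cutoff, slice the word prefix, and join it (alternative decomposition, same cost).


-- ===== PORT A =====
-- A's loop: accumulate 'retorno += palavra + " "', early return when palavra.upper() == 'MARKERS'
def pvLoopA : List String → String → String
  | [], retorno => retorno
  | palavra :: rest, retorno =>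
    if PySem.Str.upper palavra = "MARKERS" then retorno
    else pvLoopA rest (retorno ++ palavra ++ " ")

def string_sem_lixo (string : String) : String :=
  pvLoopA (PySem.Str.split₀ string) ""

-- ===== PORT B =====
-- locate the cutoff (upper.index('MARKERS') if present, else len(words)), slice the prefix, join w + ' '
def string_sem_lixo_alt (string : String) : String :=
  let words := PySem.Str.split₀ string
  let upperW := words.map PySem.Str.upper
  let cut : Nat := match PySem.List.index? upperW "MARKERS" with
    | some k => k
    | none => words.length
  PySem.Str.join "" ((words.take cut).map (fun w => w ++ " "))

-- ===== PRECONDITION & SPEC =====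
def Spec_string_sem_lixo (string : String) (out : String) : Prop := out = string_sem_lixo_alt string
instance (string : String) (out : String) : Decidable (Spec_string_sem_lixo string out) := by unfold Spec_string_sem_lixo; infer_instance

-- ===== CLAIM (what is proved, stated in full; the proofs are below) =====
def Claim_equal_string_sem_lixo : Prop := ∀ (string : String), Dom_string_sem_lixo string → Spec_string_sem_lixo string (string_sem_lixo string)

-- ===== LEMMAS AND PROOFS =====

-- ''.join on a cons is plain concatenation
theorem pv_join_empty_cons (x : String) (xs : List String) :
    PySem.Str.join "" (x :: xs) = x ++ PySem.Str.join "" xs := by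
  apply String.toList_inj.mp
  cases xs <;> simp [PySem.Str.join, PySem.Chars.join, List.intercalate]

-- B's body as a function of the word list
def pvAltOf (words : List String) : String :=
  let cut : Nat := match PySem.List.index? (words.map PySem.Str.upper) "MARKERS" with
    | some k => k
    | none => words.length
  PySem.Str.join "" ((words.take cut).map (fun w => w ++ " "))

theorem pv_loop_eq (ws : List String) : ∀ (acc : String),
    pvLoopA ws acc = acc ++ pvAltOf ws := by
  induction ws with
  | nil => intro acc; simp [pvLoopA, pvAltOf, PySem.Str.join, PySem.Chars.join, List.intercalate]
  | cons w rest ih =>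
    intro acc
    by_cases h : PySem.Str.upper w = "MARKERS"
    · simp [pvLoopA, h, pvAltOf, PySem.List.index?_eq_idxOf?, List.idxOf?_cons, PySem.Str.join,
        PySem.Chars.join, List.intercalate]
    · have hcut : (match PySem.List.index? (PySem.Str.upper w :: rest.map PySem.Str.upper) "MARKERS" with
          | some k => k
          | none => (w :: rest).length) =
          (match PySem.List.index? (rest.map PySem.Str.upper) "MARKERS" with
          | some k => k
          | none => rest.length) + 1 := by
        rw [PySem.List.index?_cons_of_ne _ h]
        cases PySem.List.index? (rest.map PySem.Str.upper) "MARKERS" <;> simp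
      simp only [pvLoopA, if_neg h, ih, pvAltOf, List.map_cons]
      rw [hcut, List.take_succ_cons, List.map_cons, pv_join_empty_cons,
        ← String.append_assoc, ← String.append_assoc]

-- ===== VERDICT (by name: the statement is the Claim_ definition above) =====
theorem string_sem_lixo_spec : Claim_equal_string_sem_lixo := by
  intro s _
  show string_sem_lixo s = string_sem_lixo_alt s
  simp only [string_sem_lixo, string_sem_lixo_alt, pv_loop_eq]
  apply String.toList_inj.mp
  simp [pvAltOf]
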